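-- pv_equiv track=rewrite | github.com/hermanschaaf/advent-of-code-2017 | day9.py | clean
-- ===== SOURCE A (Python) =====
-- def clean(s):
--     ignore = False
--     garbage = False
--     c = []
--     cnt = 0
--     for ch in s:
--         if ignore:
--             ignore = False
--             continue
--
--         if ch == "<" and not garbage:
--             garbage = True
--             continue
--         elif ch == "!":
--             ignore = True
--             continue
--
--         if garbage and ch == ">":
--             garbage = False
--         elif not garbage:
--             c.append(ch)
--         else:
--             cnt += 1
--     return "".join(c), cnt
-- ===== SOURCE B (Python) =====
-- def clean(s):
--     # Index-driven parser with an inner garbage loop (same return value as A's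
--     # flag-based state machine).
--     out = []
--     cnt = 0
--     i = 0
--     n = len(s)
--     while i < n:
--         ch = s[i]
--         if ch == "!":
--             i += 2
--         elif ch == "<":
--             i += 1
--             while i < n and s[i] != ">":
--                 if s[i] == "!":
--                     i += 2
--                 else:
--                     cnt += 1
--                     i += 1
--             i += 1  # consume the closing '>' (or run off the end)
--         else:
--             out.append(ch)
--             i += 1
--     return "".join(out), cnt
-- ===== Notes on version B (the rewrite author's own statement) =====
-- stated objective: alternative
-- what changed: Replaced A's single pass with boolean state flags (ignore/garbage) by an index-driven parser whose inner while-loop consumes an entire garbage section, eliminating the flags.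
import Mathlib
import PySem

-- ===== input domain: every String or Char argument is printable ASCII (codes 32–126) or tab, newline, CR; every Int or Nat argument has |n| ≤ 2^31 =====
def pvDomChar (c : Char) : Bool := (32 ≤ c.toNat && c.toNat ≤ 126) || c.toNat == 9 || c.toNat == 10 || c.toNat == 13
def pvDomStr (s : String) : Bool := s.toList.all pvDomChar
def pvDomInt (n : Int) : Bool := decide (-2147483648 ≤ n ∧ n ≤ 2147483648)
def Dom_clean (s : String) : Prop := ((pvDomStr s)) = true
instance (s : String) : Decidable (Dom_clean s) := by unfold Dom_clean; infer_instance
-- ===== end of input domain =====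

-- B replaces A's flag-based state machine by an index-driven parser with an
-- inner garbage loop (objective: alternative decomposition, same cost).

-- ===== PORT A =====
-- A's for-loop over the characters with state (ignore, garbage, c, cnt),
-- transliterated as structural recursion over the remaining characters.
def cleanLoop : List Char → Bool → Bool → List Char → Int → String × Int
  | [], _, _, c, cnt => (String.mk c, cnt)
  | ch :: rest, ignore, garbage, c, cnt =>
    if ignore then cleanLoop rest false garbage c cnt
    else if ch = '<' ∧ ¬ garbage then cleanLoop rest false true c cnt
    else if ch = '!' then cleanLoop rest true garbage c cnt
    else if garbage ∧ ch = '>' then cleanLoop rest false false c cnt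
    else if ¬ garbage then cleanLoop rest false garbage (c ++ [ch]) cnt
    else cleanLoop rest false garbage c (cnt + 1)

def clean (s : String) : String × Int := cleanLoop s.toList false false [] 0

-- ===== PORT B =====
-- inner `while` over the garbage section: returns (rest after the closing '>', cnt)
def garbLoop : List Char → Int → List Char × Int
  | [], cnt => ([], cnt)
  | ch :: rest, cnt =>
    if ch = '>' then (rest, cnt)
    else if ch = '!' then garbLoop (rest.drop 1) cnt
    else garbLoop rest (cnt + 1)
termination_by l _ => l.length
decreasing_by all_goals (simp; try omega)

theorem garbLoop_fst_length_le (l : List Char) (cnt : Int) :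
    (garbLoop l cnt).1.length ≤ l.length := by
  fun_induction garbLoop l cnt <;> simp_all <;> omega

-- outer `while` of B
def mainLoop : List Char → List Char → Int → String × Int
  | [], out, cnt => (String.mk out, cnt)
  | ch :: rest, out, cnt =>
    if ch = '!' then mainLoop (rest.drop 1) out cnt
    else if ch = '<' then
      let p := garbLoop rest cnt
      mainLoop p.1 out p.2
    else mainLoop rest (out ++ [ch]) cnt
termination_by l _ _ => l.length
decreasing_by all_goals (have h := garbLoop_fst_length_le rest cnt; simp; try omega)

def clean_alt (s : String) : String × Int := mainLoop s.toList [] 0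

-- ===== PRECONDITION & SPEC =====
def Spec_clean (s : String) (out : String × Int) : Prop := out = clean_alt s
instance (s : String) (out : String × Int) : Decidable (Spec_clean s out) := by unfold Spec_clean; infer_instance

-- ===== CLAIM (what is proved, stated in full; the proofs are below) =====
def Claim_equal_clean : Prop := ∀ (s : String), Dom_clean s → Spec_clean s (clean s)

-- ===== LEMMAS AND PROOFS =====

-- A in garbage mode runs exactly like B's inner loop, then resumes in normal mode.
theorem garb_eq (n : Nat) : ∀ (l c : List Char) (cnt : Int), l.length ≤ n →
    cleanLoop l false true c cnt
      = cleanLoop (garbLoop l cnt).1 false false c (garbLoop l cnt).2 := by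
  induction n with
  | zero =>
    intro l c cnt h
    have hl : l = [] := by cases l <;> simp_all
    subst hl; simp [garbLoop, cleanLoop]
  | succ n ih =>
    intro l c cnt h
    match l with
    | [] => simp [garbLoop, cleanLoop]
    | ch :: rest =>
      by_cases hgt : ch = '>'
      · subst hgt; simp [cleanLoop, garbLoop]
      · by_cases hbang : ch = '!'
        · subst hbang
          match rest with
          | [] => simp [cleanLoop, garbLoop]
          | x :: r =>
            have h1 : r.length ≤ n := by simp at h; omega
            simpa [cleanLoop, garbLoop] using ih r c cnt h1
        · have h1 : rest.length ≤ n := by simp at h; omega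
          simpa [cleanLoop, garbLoop, hgt, hbang] using ih rest c (cnt + 1) h1

-- A in normal mode runs exactly like B's outer loop.
theorem main_eq (n : Nat) : ∀ (l c : List Char) (cnt : Int), l.length ≤ n →
    cleanLoop l false false c cnt = mainLoop l c cnt := by
  induction n with
  | zero =>
    intro l c cnt h
    have hl : l = [] := by cases l <;> simp_all
    subst hl; simp [cleanLoop, mainLoop]
  | succ n ih =>
    intro l c cnt h
    match l with
    | [] => simp [cleanLoop, mainLoop]
    | ch :: rest =>
      by_cases hbang : ch = '!'
      · subst hbang
        match rest with
        | [] => simp [cleanLoop, mainLoop]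
        | x :: r =>
          have h1 : r.length ≤ n := by simp at h; omega
          simpa [cleanLoop, mainLoop] using ih r c cnt h1
      · by_cases hlt : ch = '<'
        · subst hlt
          have h1 : rest.length ≤ n := by simp at h; omega
          have h2 : (garbLoop rest cnt).1.length ≤ n :=
            le_trans (garbLoop_fst_length_le rest cnt) h1
          calc cleanLoop ('<' :: rest) false false c cnt
              = cleanLoop rest false true c cnt := by simp [cleanLoop]
            _ = cleanLoop (garbLoop rest cnt).1 false false c (garbLoop rest cnt).2 :=
                garb_eq rest.length rest c cnt le_rfl
            _ = mainLoop (garbLoop rest cnt).1 c (garbLoop rest cnt).2 :=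
                ih _ c _ h2
            _ = mainLoop ('<' :: rest) c cnt := by simp [mainLoop]
        · have h1 : rest.length ≤ n := by simp at h; omega
          simpa [cleanLoop, mainLoop, hbang, hlt] using ih rest (c ++ [ch]) cnt h1

-- ===== VERDICT (by name: the statement is the Claim_ definition above) =====
theorem clean_spec : Claim_equal_clean := by
  intro s _
  unfold Spec_clean clean clean_alt
  exact main_eq s.toList.length s.toList [] 0 le_rfl
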